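-- pv_equiv track=rewrite | github.com/SebTenHaaf/KitaevTool | FermionSystem.py | normal_order_naive
-- ===== SOURCE A (Python) =====
-- def normal_order_naive(oper_list: list):
--     """
--     Place sequence of operators in normal order, tracking the sign
--     Normal order = sorting the list of integers from smallest to largest
--     Sorting done with a bubble sort.
--     To do: handle the presence of same-site operators (for now ignored)
--     Args:
--         oper_list (list)
--     """
--     ferm_sign = 1
--     for i in range(len(oper_list) - 1):
--         flag_swap = False
--         for j in range(len(oper_list) - 1 - i):
--             if (oper_list[j] % 2) > (oper_list[j + 1] % 2):
--                 continue
--             if oper_list[j] < oper_list[j + 1] or (oper_list[j] % 2) < (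
--                 oper_list[j + 1] % 2
--             ):
--                 flag_swap = True
--                 oper_list[j], oper_list[j + 1] = oper_list[j + 1], oper_list[j]
--                 ferm_sign *= -1
--         ## if no swap took place, list is sorted
--         if not flag_swap:
--             return oper_list, ferm_sign
--
--     return oper_list, ferm_sign
-- ===== SOURCE B (Python) =====
-- def normal_order_naive(oper_list: list):
--     """Normal-order the operators: sort descending by (parity, value) and
--     compute the fermionic sign as the parity of the number of inverted pairs.
--     Like A, mutates oper_list in place (reassigns its contents)."""
--     n = len(oper_list)
--     inv = 0
--     for i in range(n):
--         for j in range(i + 1, n):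
--             if (oper_list[i] % 2, oper_list[i]) < (oper_list[j] % 2, oper_list[j]):
--                 inv += 1
--     oper_list[:] = sorted(oper_list, key=lambda x: (x % 2, x), reverse=True)
--     return oper_list, -1 if inv % 2 else 1
-- ===== Notes on version B (the rewrite author's own statement) =====
-- stated objective: alternative
-- what changed: A's in-place early-exit bubble sort (tracking sign by multiplying at every swap) is replaced by a direct count of inverted pairs under the key (x%2, x) for the sign plus one stable library sort descending by that key; like A, B reassigns oper_list's contents in place.
import Mathlib
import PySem

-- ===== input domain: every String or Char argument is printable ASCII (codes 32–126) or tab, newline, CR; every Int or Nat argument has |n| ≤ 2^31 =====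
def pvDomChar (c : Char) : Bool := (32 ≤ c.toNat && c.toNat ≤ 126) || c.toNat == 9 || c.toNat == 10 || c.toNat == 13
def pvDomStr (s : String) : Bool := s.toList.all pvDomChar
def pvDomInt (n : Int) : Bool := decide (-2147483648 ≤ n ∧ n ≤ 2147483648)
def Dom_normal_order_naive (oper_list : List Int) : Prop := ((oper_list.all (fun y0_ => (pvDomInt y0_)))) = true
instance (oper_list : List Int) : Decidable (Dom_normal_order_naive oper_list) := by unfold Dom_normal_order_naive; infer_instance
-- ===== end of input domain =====

-- B replaces A's in-place early-exit bubble sort by a direct inversion-pair parity count plus a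
-- stable key sort (alternative decomposition, same return value; like A, the Python B reassigns
-- oper_list's contents in place — the equivalence proved here is about the return value).

-- ===== PORT A =====
-- inner 'for j in range(...)' body of A (state: oper_list, ferm_sign, flag_swap)
def pvInnerStep (st : List Int × Int × Bool) (j : Int) : List Int × Int × Bool :=
  let xs := st.1
  let sign := st.2.1
  let a := PySem.List.pyGetD xs j 0
  let b := PySem.List.pyGetD xs (j+1) 0
  if PySem.Int.mod a 2 > PySem.Int.mod b 2 then st
  else if a < b ∨ PySem.Int.mod a 2 < PySem.Int.mod b 2 then
    ((xs.set j.toNat b).set (j+1).toNat a, -sign, true)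
  else st

-- outer 'for i in range(len-1)' of A, with the early 'return' when no swap occurred
def pvOuter : List Int → Int → List Int → List Int × Int
  | oper_list, ferm_sign, [] => (oper_list, ferm_sign)
  | oper_list, ferm_sign, i :: rest =>
    let st := (PySem.List.pyRange 0 (PySem.List.len oper_list - 1 - i) 1).foldl pvInnerStep
      (oper_list, ferm_sign, false)
    if st.2.2 = false then (st.1, st.2.1)
    else pvOuter st.1 st.2.1 rest

def normal_order_naive (oper_list : List Int) : List Int × Int :=
  pvOuter oper_list 1 (PySem.List.pyRange 0 (PySem.List.len oper_list - 1) 1)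

-- ===== PORT B =====
def normal_order_naive_alt (oper_list : List Int) : List Int × Int :=
  let n := PySem.List.len oper_list
  let inv := (PySem.List.pyRange 0 n 1).foldl (fun acc i =>
      (PySem.List.pyRange (i+1) n 1).foldl (fun acc2 j =>
        -- (xs[i] % 2, xs[i]) < (xs[j] % 2, xs[j]) : Python tuple '<' written out lexicographically
        if PySem.Int.mod (PySem.List.pyGetD oper_list i 0) 2 < PySem.Int.mod (PySem.List.pyGetD oper_list j 0) 2
           ∨ (PySem.Int.mod (PySem.List.pyGetD oper_list i 0) 2 = PySem.Int.mod (PySem.List.pyGetD oper_list j 0) 2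
              ∧ PySem.List.pyGetD oper_list i 0 < PySem.List.pyGetD oper_list j 0)
        then acc2 + 1 else acc2) acc) (0 : Int)
  (PySem.List.sorted2 oper_list (fun x => PySem.Int.mod x 2) (fun x => x) true,
   if PySem.Int.mod inv 2 ≠ 0 then -1 else 1)

-- ===== PRECONDITION & SPEC =====
def Spec_normal_order_naive (oper_list : List Int) (out : List Int × Int) : Prop := out = normal_order_naive_alt oper_list
instance (oper_list : List Int) (out : List Int × Int) : Decidable (Spec_normal_order_naive oper_list out) := by unfold Spec_normal_order_naive; infer_instance

-- ===== CLAIM (what is proved, stated in full; the proofs are below) =====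
def Claim_equal_normal_order_naive : Prop := ∀ (oper_list : List Int), Dom_normal_order_naive oper_list → Spec_normal_order_naive oper_list (normal_order_naive oper_list)

-- ===== LEMMAS AND PROOFS =====

-- the sort key (x % 2, x), lexicographically ordered
def pvKey (x : Int) : Lex (Int × Int) := toLex (PySem.Int.mod x 2, x)

-- one truncated bubble pass, with its swap count
def pvPass : List Int → List Int × Nat
  | [] => ([], 0)
  | [a] => ([a], 0)
  | a :: b :: t =>
    if pvKey a < pvKey b then
      let r := pvPass (a :: t); (b :: r.1, r.2 + 1)
    else
      let r := pvPass (b :: t); (a :: r.1, r.2)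
  termination_by xs => xs.length

-- number of inverted pairs i < j with key xs[i] < key xs[j]
def pvInv : List Int → Nat
  | [] => 0
  | a :: t => t.countP (fun b => decide (pvKey a < pvKey b)) + pvInv t

lemma pvKey_lt_iff (a b : Int) :
    pvKey a < pvKey b ↔ (PySem.Int.mod a 2 < PySem.Int.mod b 2 ∨
      (PySem.Int.mod a 2 = PySem.Int.mod b 2 ∧ a < b)) := by
  simp [pvKey, Prod.Lex.lt_iff]

lemma pvKey_le_iff (a b : Int) :
    pvKey a ≤ pvKey b ↔ (PySem.Int.mod a 2 < PySem.Int.mod b 2 ∨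
      (PySem.Int.mod a 2 = PySem.Int.mod b 2 ∧ a ≤ b)) := by
  simp [pvKey, Prod.Lex.le_iff]

lemma pvPass_length (xs : List Int) : (pvPass xs).1.length = xs.length := by
  fun_induction pvPass with
  | case1 => rfl
  | case2 a => rfl
  | case3 a b t h r ih => simp only [r] at ih ⊢; simp [ih]
  | case4 a b t h r ih => simp only [r] at ih ⊢; simp [ih]

lemma pvPass_perm (xs : List Int) : (pvPass xs).1.Perm xs := by
  fun_induction pvPass with
  | case1 => simp
  | case2 a => simp
  | case3 a b t h r ih =>
    simp only [r]
    exact (ih.cons b).trans (List.Perm.swap a b t)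
  | case4 a b t h r ih =>
    simp only [r]
    exact ih.cons a

lemma pvPass_zero (xs : List Int) (h : (pvPass xs).2 = 0) :
    (pvPass xs).1 = xs ∧ xs.Pairwise (fun a b => pvKey b ≤ pvKey a) := by
  fun_induction pvPass with
  | case1 => simp
  | case2 a => simp
  | case3 a b t hlt r ih => simp [r] at h
  | case4 a b t hlt r ih =>
    simp only [r] at h ⊢
    obtain ⟨h1, h2⟩ := ih h
    refine ⟨by simp [h1], ?_⟩
    rw [List.pairwise_cons]
    refine ⟨?_, h2⟩
    intro x hx
    rcases List.mem_cons.mp hx with rfl | hx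
    · exact le_of_not_gt hlt
    · exact le_trans ((List.pairwise_cons.mp h2).1 x hx) (le_of_not_gt hlt)

lemma pvPass_min (xs : List Int) (h : xs ≠ []) :
    ∃ ws m, (pvPass xs).1 = ws ++ [m] ∧ ∀ y ∈ xs, pvKey m ≤ pvKey y := by
  fun_induction pvPass with
  | case1 => simp at h
  | case2 a => exact ⟨[], a, by simp⟩
  | case3 a b t hlt r ih =>
    obtain ⟨ws, m, h1, h2⟩ := ih (by simp)
    refine ⟨b :: ws, m, by simp [r, h1], ?_⟩
    intro y hy
    rcases List.mem_cons.mp hy with rfl | hy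
    · exact h2 y (by simp)
    rcases List.mem_cons.mp hy with rfl | hy
    · exact le_trans (h2 a (by simp)) (le_of_lt hlt)
    · exact h2 y (by simp [hy])
  | case4 a b t hlt r ih =>
    obtain ⟨ws, m, h1, h2⟩ := ih (by simp)
    refine ⟨a :: ws, m, by simp [r, h1], ?_⟩
    intro y hy
    rcases List.mem_cons.mp hy with rfl | hy
    · exact le_trans (h2 b (by simp)) (le_of_not_gt hlt)
    · exact h2 y hy

lemma pvPass_inv (xs : List Int) : pvInv (pvPass xs).1 + (pvPass xs).2 = pvInv xs := by
  fun_induction pvPass with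
  | case1 => simp [pvInv]
  | case2 a => simp [pvInv]
  | case3 a b t hlt r ih =>
    have hperm : (pvPass (a :: t)).1.Perm (a :: t) := pvPass_perm _
    have hc : (pvPass (a :: t)).1.countP (fun c => decide (pvKey b < pvKey c))
        = (a :: t).countP (fun c => decide (pvKey b < pvKey c)) := hperm.countP_eq _
    simp only [r, pvInv, List.countP_cons]
    simp only [pvInv] at ih
    have hba : ¬ pvKey b < pvKey a := lt_asymm hlt
    rw [hc]
    simp [hlt, hba]
    omega
  | case4 a b t hlt r ih =>
    have hperm : (pvPass (b :: t)).1.Perm (b :: t) := pvPass_perm _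
    have hc : (pvPass (b :: t)).1.countP (fun c => decide (pvKey a < pvKey c))
        = (b :: t).countP (fun c => decide (pvKey a < pvKey c)) := hperm.countP_eq _
    simp only [r, pvInv, List.countP_cons]
    simp only [pvInv] at ih
    rw [hc]
    simp [hlt]
    omega

lemma pvInv_eq_zero (xs : List Int) (h : xs.Pairwise (fun a b => pvKey b ≤ pvKey a)) :
    pvInv xs = 0 := by
  induction xs with
  | nil => simp [pvInv]
  | cons a t ih =>
    rw [List.pairwise_cons] at h
    simp only [pvInv, ih h.2, Nat.add_zero]
    rw [List.countP_eq_zero]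
    intro b hb
    simpa using not_lt_of_ge (h.1 b hb)

lemma pvInv_append (us zs : List Int) (hdom : ∀ u ∈ us, ∀ z ∈ zs, pvKey z ≤ pvKey u)
    (hzs : zs.Pairwise (fun a b => pvKey b ≤ pvKey a)) :
    pvInv (us ++ zs) = pvInv us := by
  induction us with
  | nil => simpa using pvInv_eq_zero zs hzs
  | cons u t ih =>
    simp only [List.cons_append, pvInv, List.countP_append]
    have h0 : zs.countP (fun b => decide (pvKey u < pvKey b)) = 0 := by
      rw [List.countP_eq_zero]
      intro z hz
      simpa using not_lt_of_ge (hdom u (by simp) z hz)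
    rw [h0, ih (fun a ha => hdom a (by simp [ha]))]
    omega

lemma pvGet_mid {pre rest : List Int} {x d : Int} :
    PySem.List.pyGetD (pre ++ x :: rest) ((pre.length : Int)) d = x := by
  rw [PySem.List.pyGetD_natCast]
  simp [List.getD_eq_getElem?_getD]
lemma pvGet_mid1 {pre rest : List Int} {x y d : Int} :
    PySem.List.pyGetD (pre ++ x :: y :: rest) ((pre.length : Int) + 1) d = y := by
  have : ((pre.length : Int) + 1) = ((pre.length + 1 : Nat) : Int) := by push_cast; ring
  rw [this, PySem.List.pyGetD_natCast]
  simp [List.getD_eq_getElem?_getD]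

lemma pvSet_mid (pre : List Int) (x y : Int) (rest : List Int) :
    ((pre ++ x :: y :: rest).set pre.length y).set (pre.length + 1) x
      = pre ++ y :: x :: rest := by
  induction pre with
  | nil => simp
  | cons p t ih => simp [List.set]

lemma pvInner_eq (t : List Int) : ∀ (pre : List Int) (a : Int) (zs : List Int) (s : Int) (f : Bool),
    (PySem.List.pyRange (pre.length) ((pre.length : Int) + t.length) 1).foldl pvInnerStep
      (pre ++ a :: t ++ zs, s, f)
    = (pre ++ (pvPass (a :: t)).1 ++ zs, s * (-1) ^ (pvPass (a :: t)).2,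
       f || decide (0 < (pvPass (a :: t)).2)) := by
  induction t with
  | nil =>
    intro pre a zs s f
    have h0 : (PySem.List.pyRange (pre.length) ((pre.length : Int) + ([] : List Int).length) 1) = [] := by
      simp
    rw [h0]
    simp [pvPass]
  | cons b t' ih =>
    intro pre a zs s f
    have hlt : (pre.length : Int) < (pre.length : Int) + ((b :: t').length : Int) := by
      simp only [List.length_cons]; push_cast; omega
    rw [PySem.List.pyRange_one_cons hlt, List.foldl_cons]
    have hga : PySem.List.pyGetD (pre ++ a :: b :: t' ++ zs) ((pre.length : Int)) 0 = a := by
      simpa using pvGet_mid (pre := pre) (rest := b :: t' ++ zs)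
    have hgb : PySem.List.pyGetD (pre ++ a :: b :: t' ++ zs) ((pre.length : Int) + 1) 0 = b := by
      simpa using pvGet_mid1 (pre := pre) (rest := t' ++ zs)
    by_cases hk : pvKey a < pvKey b
    · have hc := (pvKey_lt_iff a b).mp hk
      have h1 : ¬ PySem.Int.mod a 2 > PySem.Int.mod b 2 := by omega
      have h2 : a < b ∨ PySem.Int.mod a 2 < PySem.Int.mod b 2 := by omega
      have hset : ((pre ++ a :: b :: t' ++ zs).set (↑pre.length : Int).toNat b).set
          ((↑pre.length : Int) + 1).toNat a = pre ++ b :: a :: t' ++ zs := by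
        have e1 : ((pre.length : Int)).toNat = pre.length := by omega
        have e2 : ((pre.length : Int) + 1).toNat = pre.length + 1 := by omega
        rw [e1, e2]
        simpa using pvSet_mid pre a b (t' ++ zs)
      have hstep : pvInnerStep (pre ++ a :: b :: t' ++ zs, s, f) (pre.length)
          = (pre ++ b :: a :: t' ++ zs, -s, true) := by
        simp only [pvInnerStep, hga, hgb]
        rw [if_neg h1, if_pos h2, hset]
      rw [hstep]
      have e1 : pre ++ b :: a :: t' ++ zs = (pre ++ [b]) ++ a :: t' ++ zs := by simp
      have e2 : (pre.length : Int) + 1 = ((pre ++ [b]).length : Int) := by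
        push_cast [List.length_append, List.length_cons, List.length_nil]; ring
      have e3 : (pre.length : Int) + ((b :: t').length : Int)
          = ((pre ++ [b]).length : Int) + (t'.length : Int) := by
        push_cast [List.length_append, List.length_cons, List.length_nil]; ring
      rw [e1, e2, e3, ih (pre ++ [b]) a zs (-s) true]
      have hp : pvPass (a :: b :: t') = (b :: (pvPass (a :: t')).1, (pvPass (a :: t')).2 + 1) := by
        rw [pvPass]; simp [hk]
      rw [hp]
      simp only [Prod.mk.injEq, List.append_assoc, List.cons_append, Bool.true_or]
      refine ⟨rfl, by ring, by simp⟩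
    · have hc : ¬ (PySem.Int.mod a 2 < PySem.Int.mod b 2 ∨ (PySem.Int.mod a 2 = PySem.Int.mod b 2 ∧ a < b)) := fun h => hk ((pvKey_lt_iff a b).mpr h)
      have hstep : pvInnerStep (pre ++ a :: b :: t' ++ zs, s, f) (pre.length)
          = (pre ++ a :: b :: t' ++ zs, s, f) := by
        simp only [pvInnerStep, hga, hgb]
        by_cases h1 : PySem.Int.mod a 2 > PySem.Int.mod b 2
        · rw [if_pos h1]
        · rw [if_neg h1, if_neg (by omega)]
      rw [hstep]
      have e1 : pre ++ a :: b :: t' ++ zs = (pre ++ [a]) ++ b :: t' ++ zs := by simp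
      have e2 : (pre.length : Int) + 1 = ((pre ++ [a]).length : Int) := by
        push_cast [List.length_append, List.length_cons, List.length_nil]; ring
      have e3 : (pre.length : Int) + ((b :: t').length : Int)
          = ((pre ++ [a]).length : Int) + (t'.length : Int) := by
        push_cast [List.length_append, List.length_cons, List.length_nil]; ring
      rw [e1, e2, e3, ih (pre ++ [a]) b zs s f]
      have hp : pvPass (a :: b :: t') = (a :: (pvPass (b :: t')).1, (pvPass (b :: t')).2) := by
        rw [pvPass]; simp [hk]
      rw [hp]
      simp

-- main loop invariant: ys is the unsorted prefix, zs the sorted, dominated suffix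
lemma pvOuter_eq : ∀ (k : Nat) (ys zs : List Int) (s : Int), ys.length = k + 1 →
    zs.Pairwise (fun a b => pvKey b ≤ pvKey a) →
    (∀ y ∈ ys, ∀ z ∈ zs, pvKey z ≤ pvKey y) →
    ∃ L, pvOuter (ys ++ zs) s (PySem.List.pyRange (zs.length) ((ys.length : Int) + zs.length - 1) 1)
        = (L, s * (-1) ^ pvInv (ys ++ zs))
      ∧ L.Perm (ys ++ zs) ∧ L.Pairwise (fun a b => pvKey b ≤ pvKey a) := by
  intro k
  induction k with
  | zero =>
    intro ys zs s hlen hzs hdom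
    obtain ⟨y, rfl⟩ := List.length_eq_one_iff.mp hlen
    have h0 : PySem.List.pyRange (zs.length) ((([y] : List Int).length : Int) + zs.length - 1) 1 = [] := by
      rw [PySem.List.pyRange_one]
      have : ((([y] : List Int).length : Int) + zs.length - 1 - zs.length).toNat = 0 := by
        simp
      rw [this]; simp
    rw [h0]
    refine ⟨[y] ++ zs, ?_, List.Perm.refl _, ?_⟩
    · have hpair : ([y] ++ zs).Pairwise (fun a b => pvKey b ≤ pvKey a) := by
        simp only [List.singleton_append, List.pairwise_cons]
        exact ⟨fun z hz => hdom y (by simp) z hz, hzs⟩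
      rw [pvOuter, pvInv_eq_zero _ hpair]
      simp
    · simp only [List.singleton_append, List.pairwise_cons]
      exact ⟨fun z hz => hdom y (by simp) z hz, hzs⟩
  | succ k ih =>
    intro ys zs s hlen hzs hdom
    obtain ⟨a, t, rfl⟩ : ∃ a t, ys = a :: t := by
      cases ys with
      | nil => simp at hlen
      | cons a t => exact ⟨a, t, rfl⟩
    have htlen : t.length = k + 1 := by simpa using hlen
    have hrange : PySem.List.pyRange (zs.length) (((a :: t).length : Int) + zs.length - 1) 1
        = (zs.length : Int) :: PySem.List.pyRange ((zs.length : Int) + 1) (((a :: t).length : Int) + zs.length - 1) 1 := by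
      exact PySem.List.pyRange_one_cons (by push_cast [List.length_cons]; omega)
    rw [hrange]
    rw [pvOuter]
    have hbound : PySem.List.len ((a :: t) ++ zs) - 1 - (zs.length : Int)
        = (t.length : Int) := by
      rw [PySem.List.len_eq]
      push_cast [List.length_append, List.length_cons]
      ring
    have hinner := pvInner_eq t [] a zs s false
    simp only [List.nil_append, List.length_nil, Nat.cast_zero, zero_add] at hinner
    rw [hbound, hinner]
    set P := pvPass (a :: t) with hP
    by_cases hc : P.2 = 0
    · have hflag : (false || decide (0 < P.2)) = false := by simp [hc]
      obtain ⟨hfix, hpair⟩ := pvPass_zero (a :: t) hc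
      rw [hflag]
      refine ⟨(a :: t) ++ zs, ?_, List.Perm.refl _, ?_⟩
      · have hpairall : ((a :: t) ++ zs).Pairwise (fun a b => pvKey b ≤ pvKey a) := by
          rw [List.pairwise_append]
          exact ⟨hpair, hzs, fun y hy z hz => hdom y hy z hz⟩
        rw [pvInv_eq_zero _ hpairall, hP, hfix]
        simp only [pow_zero, mul_one]
        rw [hP] at hc
        simp [hc]
      · rw [List.pairwise_append]
        exact ⟨hpair, hzs, fun y hy z hz => hdom y hy z hz⟩
    · have hflag : (false || decide (0 < P.2)) = true := by simp; omega
      rw [hflag]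
      rw [if_neg (by simp [Bool.true_eq_false])]
      obtain ⟨ws, m, hsplit, hmin⟩ := pvPass_min (a :: t) (by simp)
      have hPperm : P.1.Perm (a :: t) := pvPass_perm _
      have hwslen : ws.length = k + 1 := by
        have := pvPass_length (a :: t)
        rw [hsplit] at this
        simp at this
        omega
      have hmem : ∀ x ∈ P.1, x ∈ (a :: t) := fun x hx => hPperm.mem_iff.mp hx
      have hmzs : (m :: zs).Pairwise (fun a b => pvKey b ≤ pvKey a) := by
        rw [List.pairwise_cons]
        refine ⟨fun z hz => hdom m (hmem m (by rw [hP, hsplit]; simp)) z hz, hzs⟩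
      have hdom' : ∀ w ∈ ws, ∀ z ∈ (m :: zs), pvKey z ≤ pvKey w := by
        intro w hw z hz
        have hwys : w ∈ (a :: t) := hmem w (by rw [hP, hsplit]; simp [hw])
        rcases List.mem_cons.mp hz with rfl | hz
        · exact hmin w hwys
        · exact hdom w hwys z hz
      obtain ⟨L, hEq, hPerm, hPair⟩ := ih ws (m :: zs) (s * (-1) ^ P.2) hwslen hmzs hdom'
      have hlist : P.1 ++ zs = ws ++ m :: zs := by rw [hP, hsplit]; simp
      have e1 : (((m :: zs).length : Nat) : Int) = (zs.length : Int) + 1 := by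
        push_cast [List.length_cons]; ring
      rw [e1] at hEq
      have e2 : (ws.length : Int) + ((zs.length : Int) + 1) - 1
          = ((a :: t).length : Int) + (zs.length : Int) - 1 := by
        push_cast [List.length_cons, hwslen, htlen]; ring
      rw [e2] at hEq
      rw [← hlist] at hEq hPerm
      refine ⟨L, ?_, hPerm.trans (hPperm.append_right zs), hPair⟩
      rw [hEq]
      have hinv1 : pvInv (P.1 ++ zs) = pvInv P.1 :=
        pvInv_append _ _ (fun u hu z hz => hdom u (hmem u hu) z hz) hzs
      have hinv2 : pvInv ((a :: t) ++ zs) = pvInv (a :: t) := pvInv_append _ _ hdom hzs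
      have hinv3 : pvInv P.1 + P.2 = pvInv (a :: t) := pvPass_inv _
      rw [hinv1, show a :: t ++ zs = (a :: t) ++ zs from rfl, hinv2, ← hinv3, pow_add]
      ring_nf

-- B's sort is the stable sort by pvKey
lemma pvSorted2_eq (xs : List Int) :
    PySem.List.sorted2 xs (fun x => PySem.Int.mod x 2) (fun x => x) true
      = PySem.List.sorted xs pvKey true := by
  rw [PySem.List.sorted_rev_eq_foldl_insertBy, PySem.List.sorted2]
  have hfun : ∀ acc : List Int, ∀ x : Int,
      PySem.List.insertBy (fun a b =>
        (fun a b => decide (PySem.Int.mod a 2 < PySem.Int.mod b 2) ||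
          (!decide (PySem.Int.mod b 2 < PySem.Int.mod a 2) && decide ((a:Int) < b))) b a) x acc
      = PySem.List.insertBy (fun a b => decide (pvKey b < pvKey a)) x acc := by
    intro acc x
    congr 1
    funext a b
    rw [Bool.eq_iff_iff]
    simp only [Bool.or_eq_true, Bool.and_eq_true, Bool.not_eq_true', decide_eq_true_eq,
      decide_eq_false_iff_not, pvKey_lt_iff]
    omega
  exact PySem.List.foldl_congr_mem _ _ _ _ (fun acc x _ => hfun acc x)

lemma pvSign_eq (n : Nat) :
    (if PySem.Int.mod (n : Int) 2 ≠ 0 then (-1 : Int) else 1) = (-1) ^ n := by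
  have hm : PySem.Int.mod (n : Int) 2 = ((n % 2 : Nat) : Int) := by
    exact_mod_cast PySem.Int.mod_natCast n 2
  rcases Nat.even_or_odd n with h | h
  · rw [hm]
    simp [Nat.even_iff.mp h, h.neg_one_pow]
  · rw [hm]
    simp [Nat.odd_iff.mp h, h.neg_one_pow]

lemma pvSum (xs : List Int) :
    ((List.range xs.length).map (fun k =>
      ((xs.drop (k+1)).countP (fun b => decide (pvKey (xs.getD k 0) < pvKey b)) : Int))).sum
      = (pvInv xs : Int) := by
  induction xs with
  | nil => simp [pvInv]
  | cons a t ih =>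
    rw [List.length_cons, List.range_succ_eq_map, List.map_cons, List.map_map, List.sum_cons]
    have hcomp : ((fun k => (((a :: t).drop (k+1)).countP
          (fun b => decide (pvKey ((a :: t).getD k 0) < pvKey b)) : Int)) ∘ Nat.succ)
        = (fun k => ((t.drop (k+1)).countP (fun b => decide (pvKey (t.getD k 0) < pvKey b)) : Int)) := by
      funext k
      simp [Function.comp]
    rw [hcomp, ih]
    simp only [List.drop_succ_cons, List.drop_zero, List.getD_cons_zero, pvInv]
    push_cast
    ring

-- B's nested count is pvInv
lemma pvCount_eq (xs : List Int) :
    (PySem.List.pyRange 0 (PySem.List.len xs) 1).foldl (fun acc i =>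
      (PySem.List.pyRange (i+1) (PySem.List.len xs) 1).foldl (fun acc2 j =>
        if PySem.Int.mod (PySem.List.pyGetD xs i 0) 2 < PySem.Int.mod (PySem.List.pyGetD xs j 0) 2
           ∨ (PySem.Int.mod (PySem.List.pyGetD xs i 0) 2 = PySem.Int.mod (PySem.List.pyGetD xs j 0) 2
              ∧ PySem.List.pyGetD xs i 0 < PySem.List.pyGetD xs j 0)
        then acc2 + 1 else acc2) acc) (0 : Int) = (pvInv xs : Int) := by
  have hrow : ∀ (acc : Int), ∀ i ∈ PySem.List.pyRange 0 (PySem.List.len xs) 1,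
      (PySem.List.pyRange (i+1) (PySem.List.len xs) 1).foldl (fun acc2 j =>
        if PySem.Int.mod (PySem.List.pyGetD xs i 0) 2 < PySem.Int.mod (PySem.List.pyGetD xs j 0) 2
           ∨ (PySem.Int.mod (PySem.List.pyGetD xs i 0) 2 = PySem.Int.mod (PySem.List.pyGetD xs j 0) 2
              ∧ PySem.List.pyGetD xs i 0 < PySem.List.pyGetD xs j 0)
        then acc2 + 1 else acc2) acc
      = acc + ((xs.drop (i+1).toNat).countP
          (fun b => decide (pvKey (PySem.List.pyGetD xs i 0) < pvKey b)) : Int) := by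
    intro acc i hi
    have h0i : 0 ≤ i := (PySem.List.mem_pyRange_one.mp hi).1
    rw [PySem.List.foldl_congr_mem _ _
      (fun acc2 j => if pvKey (PySem.List.pyGetD xs i 0) < pvKey (PySem.List.pyGetD xs j 0)
        then acc2 + 1 else acc2) acc
      (by intro acc2 j _; simp only [pvKey_lt_iff])]
    rw [PySem.List.foldl_pyRange_pyGetD xs 0
      (fun acc2 b => if pvKey (PySem.List.pyGetD xs i 0) < pvKey b then acc2 + 1 else acc2) acc
      (by omega : (0:Int) ≤ i + 1)]
    rw [PySem.List.foldl_ite_add_one]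
  rw [PySem.List.foldl_congr_mem _ _
    (fun acc i => acc + ((xs.drop (i+1).toNat).countP
      (fun b => decide (pvKey (PySem.List.pyGetD xs i 0) < pvKey b)) : Int)) 0 hrow]
  rw [PySem.List.foldl_add]
  rw [PySem.List.pyRange_zero, List.map_map]
  have hlen : (PySem.List.len xs).toNat = xs.length := by
    rw [PySem.List.len_eq]; omega
  rw [hlen]
  have hmap : ∀ k ∈ List.range xs.length,
      ((fun i => ((xs.drop (i+1).toNat).countP
        (fun b => decide (pvKey (PySem.List.pyGetD xs i 0) < pvKey b)) : Int)) ∘ (fun k : Nat => (k : Int))) k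
      = (fun k => ((xs.drop (k+1)).countP (fun b => decide (pvKey (xs.getD k 0) < pvKey b)) : Int)) k := by
    intro k _
    have h1 : ((k : Int) + 1).toNat = k + 1 := by omega
    simp only [Function.comp, h1, PySem.List.pyGetD_natCast]
  rw [List.map_congr_left hmap, pvSum]
  ring

-- two key-descending permutations of the same list are equal
lemma pvUnique {l₁ l₂ : List Int} (hp : l₁.Perm l₂)
    (h₁ : l₁.Pairwise (fun a b => pvKey b ≤ pvKey a))
    (h₂ : l₂.Pairwise (fun a b => pvKey b ≤ pvKey a)) : l₁ = l₂ := by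
  have hkey : ∀ a b : Int, pvKey b ≤ pvKey a ↔
      (toLex (-(PySem.Int.mod a 2), -a) : Lex (Int × Int)) ≤ toLex (-(PySem.Int.mod b 2), -b) := by
    intro a b
    rw [pvKey_le_iff, Prod.Lex.le_iff]
    simp only [ofLex_toLex]
    omega
  refine PySem.List.eq_of_perm_of_pairwise_le_of_injective
    (fun x : Int => (toLex (-(PySem.Int.mod x 2), -x) : Lex (Int × Int))) ?_ hp ?_ ?_
  · intro a b h
    have := congrArg (fun p => (ofLex p).2) h
    simpa using this
  · exact h₁.imp (fun {a b} h => (hkey a b).mp h)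
  · exact h₂.imp (fun {a b} h => (hkey a b).mp h)

theorem pvMain (xs : List Int) : normal_order_naive xs = normal_order_naive_alt xs := by
  cases xs with
  | nil => decide
  | cons a t =>
    obtain ⟨L, hEq, hPerm, hPair⟩ :=
      pvOuter_eq t.length (a :: t) [] 1 (by simp) (by simp) (by simp)
    simp only [List.append_nil, List.length_nil, Nat.cast_zero, add_zero] at hEq hPerm
    have hA : normal_order_naive (a :: t) = (L, 1 * (-1) ^ pvInv (a :: t)) := by
      rw [normal_order_naive, PySem.List.len_eq]
      exact hEq
    have hB : normal_order_naive_alt (a :: t)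
        = (PySem.List.sorted (a :: t) pvKey true, (-1) ^ pvInv (a :: t)) := by
      rw [normal_order_naive_alt]
      simp only [pvCount_eq, pvSorted2_eq, pvSign_eq]
    rw [hA, hB, one_mul]
    have hL : L = PySem.List.sorted (a :: t) pvKey true := by
      refine pvUnique (hPerm.trans (PySem.List.sorted_perm (a :: t) pvKey true).symm) hPair ?_
      exact PySem.List.sorted_pairwise_rev (a :: t) pvKey
    rw [hL]

-- ===== VERDICT (by name: the statement is the Claim_ definition above) =====
theorem normal_order_naive_spec : Claim_equal_normal_order_naive := by
  intro xs _
  unfold Spec_normal_order_naive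
  exact pvMain xs
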